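-- pv_equiv track=rewrite | github.com/pawel2706111/uwm_dswp_wprowadzenie_2023 | lab06/lab06.py | zadanie_3
-- ===== SOURCE A (Python) =====
-- def zadanie_3(lista_numeryczna, n, najwieksze):
--     liczby = []
--     for i in lista_numeryczna:
--         if(type(i) == int or type(i) == float):
--             liczby.append(i)
--     if(len(liczby) <= n):
--         return liczby
--     liczby.sort()
--     if(najwieksze):
--         return liczby[0:n]
--     else:
--         return liczby[-n:]
-- ===== SOURCE B (Python) =====
-- def zadanie_3(lista_numeryczna, n, najwieksze):
--     liczby = [i for i in lista_numeryczna if type(i) == int or type(i) == float]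
--     if len(liczby) <= n:
--         return liczby
--     wynik = []
--     if najwieksze:
--         # select the n smallest by repeated min-extraction (ascending order)
--         for _ in range(n):
--             x = min(liczby)
--             liczby.remove(x)
--             wynik.append(x)
--     else:
--         # select the n largest by repeated max-extraction, then flip to ascending
--         for _ in range(n):
--             x = max(liczby)
--             liczby.remove(x)
--             wynik.append(x)
--         wynik.reverse()
--     return wynik
-- ===== Notes on version B (the rewrite author's own statement) =====
-- stated objective: alternative
-- what changed: B replaces A's sort-then-slice by selection without sorting: it repeatedly scans the filtered list to extract the minimum n times (najwieksze=True) or the maximum n times followed by a reverse (najwieksze=False).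
-- intended difference: For n = 0 with najwieksze=False on a nonempty list, A's slice liczby[-0:] returns the entire sorted list; B returns [], the intended 'zero largest elements'. — e.g. on zadanie_3([2, 1], 0, false): A returns [1, 2], B returns []
-- outside the precondition, e.g. on zadanie_3([1, 2, 3], -1, True): A returns [1, 2], B returns []; on zadanie_3([1, 2, 3], -1, False): A returns [2, 3], B returns []
import Mathlib
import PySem

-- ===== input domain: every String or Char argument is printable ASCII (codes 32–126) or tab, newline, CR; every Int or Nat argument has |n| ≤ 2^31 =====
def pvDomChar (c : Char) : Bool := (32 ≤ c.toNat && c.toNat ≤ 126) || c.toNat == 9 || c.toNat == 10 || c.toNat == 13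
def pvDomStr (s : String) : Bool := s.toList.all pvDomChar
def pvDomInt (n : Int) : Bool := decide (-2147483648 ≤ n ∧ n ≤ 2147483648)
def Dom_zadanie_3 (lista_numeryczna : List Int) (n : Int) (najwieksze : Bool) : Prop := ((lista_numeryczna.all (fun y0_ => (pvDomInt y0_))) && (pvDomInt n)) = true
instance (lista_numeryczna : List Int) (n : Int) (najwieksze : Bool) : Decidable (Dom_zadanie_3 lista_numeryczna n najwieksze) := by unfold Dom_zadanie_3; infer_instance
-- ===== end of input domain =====

-- B replaces sort-then-slice by repeated min/max extraction (selection of the requested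
-- elements without sorting); objective: alternative algorithm, similar cost on these sizes.

-- ===== PORT A =====
-- the 'type(i) == int or type(i) == float' test is always true on List Int, so the
-- filter loop appends every element (comment marks where the port is exact on Int)
def zadanie_3 (lista_numeryczna : List Int) (n : Int) (najwieksze : Bool) : List Int :=
  let liczby := lista_numeryczna.foldl (fun acc i => acc ++ [i]) []
  if (liczby.length : Int) ≤ n then liczby
  else
    let s := PySem.List.sorted liczby (fun x => x) false
    if najwieksze then PySem.List.slice s (some 0) (some n)
    else PySem.List.slice s (some (-n)) none

-- ===== PORT B =====
-- repeatedly extract min(liczby) (list.remove = erase first occurrence); none branch is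
-- unreachable inside Pre_ (min on a nonempty list), kept only for totality
def selMin : Nat → List Int → List Int
  | 0, _ => []
  | (k+1), xs =>
    match PySem.List.min? xs (fun x => x) with
    | none => []
    | some m => m :: selMin k (xs.erase m)

def selMax : Nat → List Int → List Int
  | 0, _ => []
  | (k+1), xs =>
    match PySem.List.max? xs (fun x => x) with
    | none => []
    | some m => m :: selMax k (xs.erase m)

def zadanie_3_alt (lista_numeryczna : List Int) (n : Int) (najwieksze : Bool) : List Int :=
  let liczby := lista_numeryczna   -- the numeric type filter keeps every Int
  if (liczby.length : Int) ≤ n then liczby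
  else if najwieksze then selMin n.toNat liczby          -- range(n): n.toNat iterations
  else (selMax n.toNat liczby).reverse

-- ===== PRECONDITION & SPEC =====
-- Pre_ excludes negative n with |n| smaller than the list length, on which A still returns
-- a value: that value (all but the last |n| sorted elements, or a sorted tail) is an
-- accident of Python's negative slice arithmetic, not a meaningful request for a negative
-- count; B returns [] there (for |n| ≥ length both programs return [] and Pre_ admits it).
def Pre_zadanie_3 (lista_numeryczna : List Int) (n : Int) (najwieksze : Bool) : Prop :=
  0 ≤ n ∨ (lista_numeryczna.length : Int) ≤ -n
instance (lista_numeryczna : List Int) (n : Int) (najwieksze : Bool) : Decidable (Pre_zadanie_3 lista_numeryczna n najwieksze) := by unfold Pre_zadanie_3; infer_instance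
def pvWitness_zadanie_3 : List Int × Int × Bool := ([3, 1, 2], 2, true)

-- For n = 0 with najwieksze = False on a nonempty list, A's slice liczby[-0:] returns the
-- entire sorted list; B returns [], the intended "zero largest elements".
def D_zadanie_3 (lista_numeryczna : List Int) (n : Int) (najwieksze : Bool) : Prop :=
  najwieksze = false ∧ n = 0 ∧ lista_numeryczna ≠ []
instance (lista_numeryczna : List Int) (n : Int) (najwieksze : Bool) : Decidable (D_zadanie_3 lista_numeryczna n najwieksze) := by unfold D_zadanie_3; infer_instance

def Spec_zadanie_3 (lista_numeryczna : List Int) (n : Int) (najwieksze : Bool) (out : List Int) : Prop := ¬ D_zadanie_3 lista_numeryczna n najwieksze → out = zadanie_3_alt lista_numeryczna n najwieksze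
instance (lista_numeryczna : List Int) (n : Int) (najwieksze : Bool) (out : List Int) : Decidable (Spec_zadanie_3 lista_numeryczna n najwieksze out) := by unfold Spec_zadanie_3; infer_instance

def pvDiffWitness_zadanie_3 : List Int × Int × Bool := ([2, 1], 0, false)
def pvDiffWitnessOut_zadanie_3 : (List Int) × (List Int) := ([1, 2], [])

-- ===== CLAIM (what is proved, stated in full; the proofs are below) =====
def Claim_unchanged_zadanie_3 : Prop := ∀ (lista_numeryczna : List Int) (n : Int) (najwieksze : Bool), Dom_zadanie_3 lista_numeryczna n najwieksze → Pre_zadanie_3 lista_numeryczna n najwieksze → Spec_zadanie_3 lista_numeryczna n najwieksze (zadanie_3 lista_numeryczna n najwieksze)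
def Claim_changed_zadanie_3 : Prop := Dom_zadanie_3 (pvDiffWitness_zadanie_3.1) (pvDiffWitness_zadanie_3.2.1) (pvDiffWitness_zadanie_3.2.2) ∧ Pre_zadanie_3 (pvDiffWitness_zadanie_3.1) (pvDiffWitness_zadanie_3.2.1) (pvDiffWitness_zadanie_3.2.2) ∧ D_zadanie_3 (pvDiffWitness_zadanie_3.1) (pvDiffWitness_zadanie_3.2.1) (pvDiffWitness_zadanie_3.2.2) ∧ zadanie_3 (pvDiffWitness_zadanie_3.1) (pvDiffWitness_zadanie_3.2.1) (pvDiffWitness_zadanie_3.2.2) = pvDiffWitnessOut_zadanie_3.1 ∧ zadanie_3_alt (pvDiffWitness_zadanie_3.1) (pvDiffWitness_zadanie_3.2.1) (pvDiffWitness_zadanie_3.2.2) = pvDiffWitnessOut_zadanie_3.2 ∧ pvDiffWitnessOut_zadanie_3.1 ≠ pvDiffWitnessOut_zadanie_3.2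
def Claim_exact_zadanie_3 : Prop := ∀ (lista_numeryczna : List Int) (n : Int) (najwieksze : Bool), Dom_zadanie_3 lista_numeryczna n najwieksze → Pre_zadanie_3 lista_numeryczna n najwieksze → D_zadanie_3 lista_numeryczna n najwieksze → zadanie_3 lista_numeryczna n najwieksze ≠ zadanie_3_alt lista_numeryczna n najwieksze

-- ===== LEMMAS AND PROOFS =====

theorem foldl_app (l : List Int) (acc : List Int) :
    l.foldl (fun a i => a ++ [i]) acc = acc ++ l := by
  induction l generalizing acc with
  | nil => simp [List.foldl]
  | cons x t ih => simp [List.foldl, ih]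

theorem sorted_min_cons (xs : List Int) (m : Int)
    (h : PySem.List.min? xs (fun x => x) = some m) :
    PySem.List.sorted xs (fun x => x) false
      = m :: PySem.List.sorted (xs.erase m) (fun x => x) false := by
  have hm : m ∈ xs := PySem.List.min?_mem h
  apply PySem.List.sorted_id_eq_of_perm_of_pairwise
  · exact ((PySem.List.sorted_perm (xs.erase m) (fun x => x) false).cons m).trans
      (List.perm_cons_erase hm).symm
  · refine List.pairwise_cons.mpr ⟨?_, PySem.List.sorted_pairwise (xs.erase m) (fun x => x)⟩
    intro b hb
    have hb' : b ∈ xs.erase m := (PySem.List.mem_sorted _ _ _ _).mp hb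
    exact PySem.List.min?_isMin h b (List.mem_of_mem_erase hb')

theorem sorted_max_snoc (xs : List Int) (m : Int)
    (h : PySem.List.max? xs (fun x => x) = some m) :
    PySem.List.sorted xs (fun x => x) false
      = PySem.List.sorted (xs.erase m) (fun x => x) false ++ [m] := by
  have hm : m ∈ xs := PySem.List.max?_mem h
  apply PySem.List.sorted_id_eq_of_perm_of_pairwise
  · have h1 := (PySem.List.sorted_perm (xs.erase m) (fun x => x) false).append_right [m]
    exact h1.trans ((List.perm_append_singleton m _).trans (List.perm_cons_erase hm).symm)
  · refine List.pairwise_append.mpr ⟨PySem.List.sorted_pairwise (xs.erase m) (fun x => x),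
      List.pairwise_singleton _ _, ?_⟩
    intro a ha b hb
    have hb' : b = m := List.mem_singleton.mp hb
    have ha' : a ∈ xs.erase m := (PySem.List.mem_sorted _ _ _ _).mp ha
    subst hb'
    exact PySem.List.max?_isMax h a (List.mem_of_mem_erase ha')

theorem selMin_eq (len : Nat) : ∀ (xs : List Int), xs.length ≤ len → ∀ (k : Nat),
    selMin k xs = (PySem.List.sorted xs (fun x => x) false).take k := by
  induction len with
  | zero =>
    intro xs hx k
    have hxs : xs = [] := List.eq_nil_of_length_eq_zero (Nat.le_zero.mp hx)
    subst hxs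
    cases k with
    | zero => simp [selMin]
    | succ k =>
      simp only [selMin]
      rw [(PySem.List.min?_eq_none_iff ([] : List Int) (fun x => x)).mpr rfl]
      rw [(PySem.List.sorted_eq_nil_iff ([] : List Int) (fun x => x) false).mpr rfl]
      simp
  | succ N ih =>
    intro xs hx k
    cases k with
    | zero => simp [selMin]
    | succ k =>
      cases hmin : PySem.List.min? xs (fun x => x) with
      | none =>
        have hxs : xs = [] := (PySem.List.min?_eq_none_iff _ _).mp hmin
        subst hxs
        simp only [selMin]
        rw [(PySem.List.min?_eq_none_iff ([] : List Int) (fun x => x)).mpr rfl]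
        rw [(PySem.List.sorted_eq_nil_iff ([] : List Int) (fun x => x) false).mpr rfl]
        simp
      | some m =>
        have hm : m ∈ xs := PySem.List.min?_mem hmin
        rw [sorted_min_cons xs m hmin]
        simp only [selMin, hmin, List.take_succ_cons]
        have hlen : (xs.erase m).length = xs.length - 1 := List.length_erase_of_mem hm
        have hpos : 0 < xs.length := List.length_pos_of_mem hm
        exact congrArg (m :: ·) (ih (xs.erase m) (by omega) k)

theorem selMax_eq (len : Nat) : ∀ (xs : List Int), xs.length ≤ len → ∀ (k : Nat), k ≤ xs.length →
    selMax k xs = ((PySem.List.sorted xs (fun x => x) false).drop (xs.length - k)).reverse := by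
  induction len with
  | zero =>
    intro xs hx k hk
    have hxs : xs = [] := List.eq_nil_of_length_eq_zero (Nat.le_zero.mp hx)
    subst hxs
    have hk0 : k = 0 := Nat.le_zero.mp hk
    subst hk0
    simp only [selMax, List.drop_nil, List.reverse_nil]
    rw [(PySem.List.sorted_eq_nil_iff ([] : List Int) (fun x => x) false).mpr rfl]
    simp
  | succ N ih =>
    intro xs hx k hk
    cases k with
    | zero => simp [selMax]
    | succ k =>
      cases hmax : PySem.List.max? xs (fun x => x) with
      | none =>
        have hxs : xs = [] := (PySem.List.max?_eq_none_iff _ _).mp hmax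
        subst hxs; simp at hk
      | some m =>
        have hm : m ∈ xs := PySem.List.max?_mem hmax
        have hlen : (xs.erase m).length = xs.length - 1 := List.length_erase_of_mem hm
        have hpos : 0 < xs.length := List.length_pos_of_mem hm
        rw [sorted_max_snoc xs m hmax]
        have hslen : (PySem.List.sorted (xs.erase m) (fun x => x) false).length
            = xs.length - 1 := by rw [PySem.List.length_sorted]; exact hlen
        have hj : xs.length - (k + 1) ≤ (PySem.List.sorted (xs.erase m) (fun x => x) false).length := by
          omega
        rw [List.drop_append_of_le_length hj, List.reverse_append, List.reverse_singleton]
        simp only [selMax, hmax, List.singleton_append]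
        have hrec := ih (xs.erase m) (by omega) k (by omega)
        rw [hrec]
        have heq : (xs.erase m).length - k = xs.length - (k + 1) := by omega
        rw [heq]

-- ===== VERDICT (by name: the statement is the Claim_ definition above) =====
theorem zadanie_3_spec : Claim_unchanged_zadanie_3 := by
  intro l n naj hDom hPre hD
  simp only [zadanie_3, zadanie_3_alt, foldl_app, List.nil_append]
  by_cases hle : (l.length : Int) ≤ n
  · simp [hle]
  · rw [if_neg hle, if_neg hle]
    have hnlt : n < (l.length : Int) := lt_of_not_ge hle
    by_cases hnn : (0 : Int) ≤ n
    case neg =>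
      -- negative n admitted by Pre_ (length ≤ -n): both sides are []
      have hneg : n < 0 := lt_of_not_ge hnn
      have hlen : (l.length : Int) ≤ -n := by
        rcases hPre with h | h
        · exact absurd h hnn
        · exact h
      have hkpos : 0 < (-n).toNat := by omega
      have htz : n.toNat = 0 := by omega
      have hcast : n = -(((-n).toNat : Nat) : Int) := by omega
      cases naj with
      | true =>
        rw [if_pos rfl, if_pos rfl, PySem.List.slice_zero_start, hcast,
          PySem.List.slice_to_neg_natCast _ _ hkpos, PySem.List.length_sorted]
        have h0 : l.length - (-n).toNat = 0 := by omega
        have htz2 : ((-(((-n).toNat : Nat) : Int))).toNat = 0 := by omega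
        rw [h0, List.take_zero, htz2]
        simp [selMin]
      | false =>
        rw [if_neg Bool.false_ne_true, if_neg Bool.false_ne_true, htz]
        have hnn2 : (0 : Int) ≤ -n := by omega
        rw [PySem.List.slice_from _ hnn2,
          List.drop_eq_nil_of_le (by rw [PySem.List.length_sorted]; omega)]
        simp [selMax]
    case pos =>
    have hPre' : (0 : Int) ≤ n := hnn
    have hkle : n.toNat ≤ l.length := by
      have := Int.toNat_of_nonneg hPre'; omega
    cases naj with
    | true =>
      rw [if_pos rfl, if_pos rfl, PySem.List.slice_zero_start, PySem.List.slice_to _ hPre']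
      exact (selMin_eq l.length l le_rfl n.toNat).symm
    | false =>
      have hne : l ≠ [] := by
        intro h0; subst h0; simp only [List.length_nil, Int.natCast_zero] at hnlt; omega
      have hn0 : n ≠ 0 := fun h0 => hD ⟨rfl, h0, hne⟩
      have hkpos : 0 < n.toNat := by
        have := Int.toNat_of_nonneg hPre'; omega
      rw [if_neg Bool.false_ne_true, if_neg Bool.false_ne_true]
      have hcast : -n = -((n.toNat : Nat) : Int) := by
        rw [Int.toNat_of_nonneg hPre']
      rw [hcast, PySem.List.slice_from_neg_natCast _ _ hkpos,
        PySem.List.length_sorted,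
        selMax_eq l.length l le_rfl n.toNat hkle, List.reverse_reverse]

theorem zadanie_3_changed : Claim_changed_zadanie_3 := by
  unfold Claim_changed_zadanie_3; decide

theorem zadanie_3_tight : Claim_exact_zadanie_3 := by
  intro l n naj hDom hPre hDd
  obtain ⟨hnaj, hn0, hne⟩ := hDd
  subst hnaj; subst hn0
  have hpos : 0 < l.length := List.length_pos_of_ne_nil hne
  have hnle : ¬ ((l.length : Int) ≤ 0) := by omega
  simp only [zadanie_3, zadanie_3_alt, foldl_app, List.nil_append, if_neg hnle,
    if_neg Bool.false_ne_true]
  rw [show (-(0 : Int)) = (0 : Int) from neg_zero, PySem.List.slice_from _ le_rfl]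
  simp only [Int.toNat_zero, List.drop_zero, selMax, List.reverse_nil]
  rw [Ne, PySem.List.sorted_eq_nil_iff]
  exact hne
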